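-- pv_equiv track=rewrite | github.com/DEVZOOO/study | python/cosPro1/5th/Q05_catchMonsters.py | solution
-- ===== SOURCE A (Python) =====
-- def solution(enemies, armies):
-- 	answer = 0
--
-- 	armies.sort()
-- 	enemies.sort()
--
-- 	for army in armies :
-- 		if len(enemies) == 0 :
-- 			break
-- 		if army >= enemies[0] :
-- 			enemies.pop(0)
-- 			answer += 1
--
-- 	return answer
-- ===== SOURCE B (Python) =====
-- def solution(enemies, armies):
--     es = sorted(enemies)
--     i = 0
--     for army in sorted(armies):
--         if i < len(es) and army >= es[i]:
--             i += 1
--     return i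
-- ===== Notes on version B (the rewrite author's own statement) =====
-- stated objective: faster
-- what changed: Replaces the in-place sort plus repeated enemies.pop(0) (O(n) per pop) with a non-mutating two-pointer index over the two sorted lists.
import Mathlib
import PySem

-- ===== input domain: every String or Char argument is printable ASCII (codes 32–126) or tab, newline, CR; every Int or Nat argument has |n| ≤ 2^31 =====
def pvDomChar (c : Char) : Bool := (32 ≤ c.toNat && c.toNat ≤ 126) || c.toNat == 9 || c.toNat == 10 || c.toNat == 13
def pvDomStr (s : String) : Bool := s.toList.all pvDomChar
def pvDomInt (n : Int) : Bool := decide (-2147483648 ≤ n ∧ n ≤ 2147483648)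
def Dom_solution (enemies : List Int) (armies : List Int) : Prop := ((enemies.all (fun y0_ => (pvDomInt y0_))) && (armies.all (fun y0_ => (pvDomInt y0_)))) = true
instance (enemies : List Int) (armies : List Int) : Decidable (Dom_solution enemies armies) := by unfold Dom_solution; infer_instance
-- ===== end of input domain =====

-- B replaces A's in-place sort + repeated enemies.pop(0) with a non-mutating two-pointer
-- index over the two sorted lists (objective: faster; A mutates its arguments, B does not;
-- the equivalence proved here is about the return value only).

-- ===== PORT A =====
-- the for-loop over armies, carrying the remaining (sorted) enemies and the answer;
-- 'break' when enemies is empty returns answer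
def solutionLoopA : List Int → List Int → Int → Int
  | [], _, answer => answer
  | _ :: _, [], answer => answer
  | army :: rest, e :: es, answer =>
    if army ≥ e then solutionLoopA rest es (answer + 1)
    else solutionLoopA rest (e :: es) answer

def solution (enemies : List Int) (armies : List Int) : Int :=
  solutionLoopA (PySem.List.sorted armies (fun x => x) false)
    (PySem.List.sorted enemies (fun x => x) false) 0

-- ===== PORT B =====
def solution_alt (enemies : List Int) (armies : List Int) : Int :=
  let es := PySem.List.sorted enemies (fun x => x) false
  (PySem.List.sorted armies (fun x => x) false).foldl
    (fun i army =>
      if i < (es.length : Int) ∧ (PySem.List.pyGet? es i).getD 0 ≤ army then i + 1 else i)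
    0

-- ===== PRECONDITION & SPEC =====
def Spec_solution (enemies : List Int) (armies : List Int) (out : Int) : Prop := out = solution_alt enemies armies
instance (enemies : List Int) (armies : List Int) (out : Int) : Decidable (Spec_solution enemies armies out) := by unfold Spec_solution; infer_instance

-- ===== CLAIM (what is proved, stated in full; the proofs are below) =====
def Claim_equal_solution : Prop := ∀ (enemies : List Int) (armies : List Int), Dom_solution enemies armies → Spec_solution enemies armies (solution enemies armies)

-- ===== LEMMAS AND PROOFS =====

-- A's loop on an empty enemy list returns the accumulator
theorem solutionLoopA_nil (armies : List Int) (a : Int) : solutionLoopA armies [] a = a := by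
  cases armies <;> rfl

-- A's loop only adds to the accumulator
theorem solutionLoopA_add (armies es : List Int) (a : Int) :
    solutionLoopA armies es a = a + solutionLoopA armies es 0 := by
  induction armies generalizing es a with
  | nil => simp [solutionLoopA]
  | cons army rest ih =>
    cases es with
    | nil => simp [solutionLoopA]
    | cons e es' =>
      by_cases h : army ≥ e
      · simp only [solutionLoopA, if_pos h]
        rw [ih es' (a + 1), ih es' (0 + 1)]; ring
      · simp only [solutionLoopA, if_neg h]
        exact ih (e :: es') a

-- B's fold starting at index i equals i plus A's loop on the dropped suffix
theorem foldB_eq (es : List Int) (armies : List Int) (i : Nat) :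
    armies.foldl
      (fun j army =>
        if j < (es.length : Int) ∧ (PySem.List.pyGet? es j).getD 0 ≤ army then j + 1 else j)
      (i : Int)
    = i + solutionLoopA armies (es.drop i) 0 := by
  induction armies generalizing i with
  | nil => simp [solutionLoopA]
  | cons army rest ih =>
    by_cases hlt : i < es.length
    · obtain ⟨e, es', hdrop⟩ : ∃ e es', es.drop i = e :: es' := by
        cases h : es.drop i with
        | nil => exact absurd (List.drop_eq_nil_iff.mp h) (by omega)
        | cons e es' => exact ⟨e, es', rfl⟩
      have hget : es[i]? = some e := by
        have h0 : (es.drop i)[0]? = es[i + 0]? := List.getElem?_drop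
        simpa [hdrop] using h0.symm
      have hpy : (PySem.List.pyGet? es (i : Int)).getD 0 = e := by
        rw [PySem.List.pyGet?_natCast, hget]; rfl
      by_cases hcmp : e ≤ army
      · have hcond : ((i : Int) < (es.length : Int) ∧
            (PySem.List.pyGet? es (i : Int)).getD 0 ≤ army) := ⟨by exact_mod_cast hlt, by rw [hpy]; exact hcmp⟩
        simp only [List.foldl_cons, if_pos hcond]
        have : ((i : Int) + 1) = ((i + 1 : Nat) : Int) := by push_cast; ring
        rw [this, ih (i + 1)]
        have hdrop' : es.drop (i + 1) = es' := by
          have h1 : es.drop (i + 1) = (es.drop i).drop 1 := (List.drop_drop ..).symm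
          rw [h1, hdrop]; rfl
        rw [hdrop', hdrop]
        simp only [solutionLoopA, if_pos (show army ≥ e from hcmp)]
        rw [solutionLoopA_add rest es' (0 + 1)]; push_cast; ring
      · have hcond : ¬((i : Int) < (es.length : Int) ∧
            (PySem.List.pyGet? es (i : Int)).getD 0 ≤ army) := by
          rw [hpy]; intro ⟨_, h2⟩; exact hcmp h2
        simp only [List.foldl_cons, if_neg hcond]
        rw [ih i, hdrop]
        simp [solutionLoopA, hcmp]
    · have hdrop : es.drop i = [] := List.drop_eq_nil_iff.mpr (by omega)
      have hcond : ¬((i : Int) < (es.length : Int) ∧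
          (PySem.List.pyGet? es (i : Int)).getD 0 ≤ army) := by
        intro ⟨h1, _⟩; exact hlt (by exact_mod_cast h1)
      simp only [List.foldl_cons, if_neg hcond]
      rw [ih i, hdrop]
      simp [solutionLoopA_nil]

-- ===== VERDICT (by name: the statement is the Claim_ definition above) =====
theorem solution_spec : Claim_equal_solution := by
  intro enemies armies _
  unfold Spec_solution solution solution_alt
  have := foldB_eq (PySem.List.sorted enemies (fun x => x) false)
    (PySem.List.sorted armies (fun x => x) false) 0
  simpa using this.symm
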